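-- pv_equiv track=rewrite | github.com/Baros16/projet_crypto | package/bibliotheque_gr2.py | index_key
-- ===== SOURCE A (Python) =====
-- def index_key(clef):
--     # A - Classer les caracteres par ordre alphabetique et obtenir les indices
--     toto = sorted(clef)
--
--     # B - Creer un dictionnaire pour stocker les indices des caracteres
--     indices_dict = {}
--     for index, caractere in enumerate(toto):
--         if caractere not in indices_dict:
--             indices_dict[caractere] = []
--         indices_dict[caractere].append(index)
--
--     # C - Creer la liste des indices correspondant aux caracteres de clef
--     indices = []
--     for caractere in clef:
--         indices.append(indices_dict[caractere].pop(0))  # Recuperer l'indice et le supprimer de la liste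
--
--     return indices
-- ===== SOURCE B (Python) =====
-- def index_key(clef):
--     # Direct rank computation, no sorting: the stable sorted position of clef[i] is
--     # (number of characters strictly smaller anywhere) + (number of equal characters seen earlier).
--     less = {}
--     for c in clef:
--         if c not in less:
--             less[c] = sum(1 for d in clef if d < c)
--     seen = {}
--     indices = []
--     for c in clef:
--         k = seen.get(c, 0)
--         indices.append(less[c] + k)
--         seen[c] = k + 1
--     return indices
-- ===== Notes on version B (the rewrite author's own statement) =====
-- stated objective: faster
-- what changed: B computes each rank directly by counting (characters strictly smaller anywhere in clef, memoized once per distinct character, plus equal characters seen so far via a counter dict), replacing A's sort + dictionary of index queues drained with list.pop(0).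
import Mathlib
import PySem

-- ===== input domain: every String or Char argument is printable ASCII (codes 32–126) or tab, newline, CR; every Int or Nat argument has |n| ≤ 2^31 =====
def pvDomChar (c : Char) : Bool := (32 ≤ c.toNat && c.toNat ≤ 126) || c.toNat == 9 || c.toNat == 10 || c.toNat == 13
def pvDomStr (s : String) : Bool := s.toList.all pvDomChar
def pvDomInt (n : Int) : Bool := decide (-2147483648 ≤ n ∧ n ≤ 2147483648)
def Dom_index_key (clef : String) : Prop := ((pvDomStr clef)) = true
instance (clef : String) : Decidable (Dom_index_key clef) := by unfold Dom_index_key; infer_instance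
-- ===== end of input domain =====

-- B replaces A's sort + dictionary-of-index-queues drained with list.pop(0) by a direct
-- count-based rank computation (memoized counts); measured faster on large inputs.

-- ===== PORT A =====
-- the body of A's dict-building loop: 'if caractere not in indices_dict: indices_dict[caractere] = []'
-- then 'indices_dict[caractere].append(index)'
def buildStep (d : PySem.Dict Char (List Int)) (p : Int × Char) : PySem.Dict Char (List Int) :=
  let d' := if d.contains p.2 then d else d.insert p.2 []
  d'.modify p.2 [] (fun xs => xs ++ [p.1])

-- the body of A's second loop: 'indices.append(indices_dict[caractere].pop(0))'
def drainStep (st : PySem.Dict Char (List Int) × List Int) (c : Char) :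
    PySem.Dict Char (List Int) × List Int :=
  match st.1.get? c with
  | some (x :: rest) => (st.1.insert c rest, st.2 ++ [x])
  | _ => st  -- unreachable: Python would raise KeyError/IndexError; never happens for any clef

def index_key (clef : String) : List Int :=
  let toto := PySem.List.sorted clef.toList (fun x => x)
  let d := (PySem.List.enumerate toto 0).foldl buildStep PySem.Dict.empty
  (clef.toList.foldl drainStep (d, [])).2

-- ===== PORT B =====
-- B's first loop: "if c not in less: less[c] = sum(1 for d in clef if d < c)"
def memoStep (full : List Char) (d : PySem.Dict Char Int) (c : Char) : PySem.Dict Char Int :=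
  if d.contains c then d else d.insert c ((full.countP (fun x => decide (x < c)) : Nat) : Int)

-- B's second loop: "k = seen.get(c, 0); indices.append(less[c] + k); seen[c] = k + 1"
def altStep (lessD : PySem.Dict Char Int) (st : PySem.Dict Char Int × List Int) (c : Char) :
    PySem.Dict Char Int × List Int :=
  let k := st.1.getD c 0
  match lessD.get? c with
  | some v => (st.1.insert c (k + 1), st.2 ++ [v + k])
  | none => st  -- unreachable: Python would raise KeyError; every character of clef is a key of less

def index_key_alt (clef : String) : List Int :=
  let lessD := clef.toList.foldl (memoStep clef.toList) PySem.Dict.empty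
  (clef.toList.foldl (altStep lessD) (PySem.Dict.empty, [])).2

-- ===== PRECONDITION & SPEC =====
def Spec_index_key (clef : String) (out : List Int) : Prop := out = index_key_alt clef
instance (clef : String) (out : List Int) : Decidable (Spec_index_key clef out) := by unfold Spec_index_key; infer_instance

-- ===== CLAIM (what is proved, stated in full; the proofs are below) =====
def Claim_equal_index_key : Prop := ∀ (clef : String), Dom_index_key clef → Spec_index_key clef (index_key clef)

-- ===== LEMMAS AND PROOFS =====

-- the indices (first components) of the enumerated pairs whose character is c
def selIdx (ps : List (Int × Char)) (c : Char) : List Int :=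
  (ps.filter (fun p => decide (p.2 = c))).map (·.1)

lemma get?_eq_some_getD {κ ν : Type} [BEq κ] (d : PySem.Dict κ ν) (k : κ) (d0 : ν)
    (h : d.contains k = true) : d.get? k = some (d.getD k d0) := by
  have hc := PySem.Dict.contains_eq_isSome_get? d k
  rw [h] at hc
  cases hg : d.get? k with
  | none => rw [hg] at hc; simp at hc
  | some v => rw [PySem.Dict.getD_eq_get?_getD, hg]; rfl

lemma get?_buildStep (d : PySem.Dict Char (List Int)) (p : Int × Char) (c : Char) :
    (buildStep d p).get? c =
      if c = p.2 then some (d.getD p.2 [] ++ [p.1]) else d.get? c := by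
  unfold buildStep
  set d' := if d.contains p.2 then d else d.insert p.2 [] with hd'
  have hgd : d'.getD p.2 [] = d.getD p.2 [] := by
    by_cases h : d.contains p.2 = true
    · simp [hd', h]
    · simp only [Bool.not_eq_true] at h
      simp [hd', h, PySem.Dict.getD_of_not_contains d _ h]
  by_cases hc : c = p.2
  · subst hc
    rw [if_pos rfl]
    have hcont : (d'.modify p.2 [] (fun xs => xs ++ [p.1])).contains p.2 = true := by
      simp [PySem.Dict.contains_modify]
    rw [get?_eq_some_getD _ _ ([] : List Int) hcont]
    rw [PySem.Dict.getD_modify, if_pos rfl, hgd]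
  · rw [if_neg hc]
    have hcont : (d'.modify p.2 [] (fun xs => xs ++ [p.1])).contains c = d.contains c := by
      have : d'.contains c = d.contains c := by
        by_cases h : d.contains p.2 = true
        · simp [hd', h]
        · simp only [Bool.not_eq_true] at h
          simp [hd', h, PySem.Dict.contains_insert, beq_iff_eq, hc]
      simp [PySem.Dict.contains_modify, beq_iff_eq, hc, this]
    by_cases h : d.contains c = true
    · rw [get?_eq_some_getD _ _ ([] : List Int) (by rw [hcont]; exact h),
          get?_eq_some_getD d c ([] : List Int) h]
      congr 1
      rw [PySem.Dict.getD_modify, if_neg hc]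
      by_cases hpc : d.contains p.2 = true
      · simp [hd', hpc]
      · simp only [Bool.not_eq_true] at hpc
        simp [hd', hpc, PySem.Dict.getD_insert, hc]
    · simp only [Bool.not_eq_true] at h
      rw [(PySem.Dict.get?_eq_none_iff_contains _ _).2 (by rw [hcont]; exact h),
          (PySem.Dict.get?_eq_none_iff_contains _ _).2 h]

lemma getD_buildStep (d : PySem.Dict Char (List Int)) (p : Int × Char) (c : Char) :
    (buildStep d p).getD c [] =
      if c = p.2 then d.getD p.2 [] ++ [p.1] else d.getD c [] := by
  rw [PySem.Dict.getD_eq_get?_getD, get?_buildStep]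
  by_cases hc : c = p.2
  · simp [hc]
  · simp [hc, PySem.Dict.getD_eq_get?_getD]

lemma selIdx_eq_nil (ps : List (Int × Char)) (c : Char)
    (h : c ∉ ps.map (·.2)) : selIdx ps c = [] := by
  unfold selIdx
  rw [List.filter_eq_nil_iff.2, List.map_nil]
  intro p hp
  simp only [decide_eq_true_eq]
  intro hpc
  exact h (List.mem_map.2 ⟨p, hp, hpc⟩)

lemma build_get? (ps : List (Int × Char)) : ∀ (d : PySem.Dict Char (List Int)) (c : Char),
    (ps.foldl buildStep d).get? c =
      if c ∈ ps.map (·.2) then some (d.getD c [] ++ selIdx ps c) else d.get? c := by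
  induction ps with
  | nil => intro d c; simp
  | cons p ps ih =>
    intro d c
    rw [List.foldl_cons, ih]
    have hsel : selIdx (p :: ps) c =
        (if c = p.2 then [p.1] else []) ++ selIdx ps c := by
      unfold selIdx
      rcases eq_or_ne c p.2 with h | h
      · simp [h.symm]
      · simp [Ne.symm h, h]
    rcases eq_or_ne c p.2 with hc | hc
    · have hmem' : c ∈ (p :: ps).map (·.2) := by simp [hc]
      by_cases hmem : c ∈ ps.map (·.2)
      · rw [if_pos hmem, if_pos hmem', getD_buildStep, if_pos hc, hsel, if_pos hc, hc,
            List.append_assoc]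
      · rw [if_neg hmem, if_pos hmem', get?_buildStep, if_pos hc, hsel, if_pos hc,
            selIdx_eq_nil ps c hmem, hc]
        rfl
    · have h1 : (buildStep d p).getD c [] = d.getD c [] := by rw [getD_buildStep, if_neg hc]
      have h2 : (buildStep d p).get? c = d.get? c := by rw [get?_buildStep, if_neg hc]
      have hm : (c ∈ (p :: ps).map (·.2)) ↔ c ∈ ps.map (·.2) := by simp [hc]
      rw [h1, h2, hsel, if_neg hc, List.nil_append]
      by_cases hmem : c ∈ ps.map (·.2)
      · rw [if_pos hmem, if_pos (hm.mpr hmem)]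
      · rw [if_neg hmem, if_neg (fun h => hmem (hm.mp h))]

-- a ≤-sorted list splits as (elements < c) ++ (count c copies of c) ++ (elements > c)
lemma sorted_decomp (t : List Char) (h : t.Pairwise (· ≤ ·)) (c : Char) :
    t = t.filter (fun x => decide (x < c)) ++ List.replicate (t.count c) c
        ++ t.filter (fun x => decide (c < x)) := by
  induction t with
  | nil => simp
  | cons x t ih =>
    rw [List.pairwise_cons] at h
    obtain ⟨hx, ht⟩ := h
    have ihe := ih ht
    rcases lt_trichotomy x c with hlt | heq | hgt
    · have e2 : (x :: t).count c = t.count c := List.count_cons_of_ne hlt.ne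
      rw [e2, List.filter_cons, List.filter_cons]
      simp only [hlt, decide_true, if_true, asymm hlt, decide_false, Bool.false_eq_true,
        if_false, List.cons_append]
      exact congrArg (x :: ·) ihe
    · subst heq
      have htf : t.filter (fun y => decide (y < x)) = [] := by
        rw [List.filter_eq_nil_iff]
        intro y hy
        simpa using not_lt_of_ge (hx y hy)
      rw [htf, List.nil_append] at ihe
      rw [List.filter_cons, List.filter_cons, List.count_cons_self]
      simp only [lt_irrefl, decide_false, Bool.false_eq_true, if_false, htf,
        List.nil_append, List.replicate_succ, List.cons_append]
      exact congrArg (x :: ·) ihe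
    · have hnotin : c ∉ t := fun hc => absurd (hx c hc) (not_le_of_gt hgt)
      have hcnt : t.count c = 0 := List.count_eq_zero.2 hnotin
      have htf : t.filter (fun y => decide (y < c)) = [] := by
        rw [List.filter_eq_nil_iff]
        intro y hy
        simpa using asymm (lt_of_lt_of_le hgt (hx y hy))
      rw [htf, hcnt, List.replicate_zero, List.nil_append, List.nil_append] at ihe
      rw [List.filter_cons, List.filter_cons, List.count_cons_of_ne hgt.ne', hcnt]
      simp only [asymm hgt, decide_false, Bool.false_eq_true, if_false, hgt, decide_true,
        if_true, htf, List.replicate_zero, List.nil_append]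
      exact congrArg (x :: ·) ihe

-- indices of character c inside an enumeration of a sorted list form a contiguous range
lemma selIdx_append (ps qs : List (Int × Char)) (c : Char) :
    selIdx (ps ++ qs) c = selIdx ps c ++ selIdx qs c := by
  simp [selIdx]

lemma selIdx_enum_of_ne (u : List Char) (c : Char) (s : Int) (hu : ∀ y ∈ u, y ≠ c) :
    selIdx (PySem.List.enumerate u s) c = [] := by
  apply selIdx_eq_nil
  rw [PySem.List.map_snd_enumerate]
  intro hmem
  exact hu c hmem rfl

lemma selIdx_enum_replicate (m : Nat) (c : Char) (s : Int) :
    selIdx (PySem.List.enumerate (List.replicate m c) s) c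
      = PySem.List.pyRange s (s + (m : Int)) := by
  unfold selIdx
  have hf : (PySem.List.enumerate (List.replicate m c) s).filter (fun p => decide (p.2 = c))
      = PySem.List.enumerate (List.replicate m c) s := by
    rw [List.filter_eq_self]
    intro p hp
    have hsnd : p.2 ∈ List.replicate m c := by
      have hm := PySem.List.map_snd_enumerate (List.replicate m c) s
      exact hm ▸ List.mem_map_of_mem hp
    simpa using List.eq_of_mem_replicate hsnd
  rw [hf, PySem.List.map_fst_enumerate, List.length_replicate]

lemma selIdx_enum_sorted (t : List Char) (h : t.Pairwise (· ≤ ·)) (c : Char) (s : Int) :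
    selIdx (PySem.List.enumerate t s) c =
      PySem.List.pyRange (s + (t.countP (fun x => decide (x < c)) : Int))
        (s + (t.countP (fun x => decide (x < c)) : Int) + (t.count c : Int)) := by
  conv_lhs => rw [sorted_decomp t h c]
  rw [PySem.List.enumerate_append, PySem.List.enumerate_append, selIdx_append, selIdx_append]
  rw [selIdx_enum_of_ne _ c _ (by intro y hy; simp only [List.mem_filter,
        decide_eq_true_eq] at hy; exact ne_of_lt hy.2),
      selIdx_enum_replicate,
      selIdx_enum_of_ne _ c _ (by intro y hy; simp only [List.mem_filter,
        decide_eq_true_eq] at hy; exact (ne_of_lt hy.2).symm)]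
  rw [← List.countP_eq_length_filter]
  simp

lemma memo_get? (full : List Char) : ∀ (r : List Char) (d : PySem.Dict Char Int) (c : Char),
    (r.foldl (memoStep full) d).get? c =
      if d.contains c = false ∧ c ∈ r
      then some ((full.countP (fun x => decide (x < c)) : Nat) : Int)
      else d.get? c := by
  intro r
  induction r with
  | nil => intro d c; simp
  | cons c0 r ih =>
    intro d c
    rw [List.foldl_cons, ih]
    by_cases hcd : d.contains c0 = true
    · have hstep : memoStep full d c0 = d := by simp [memoStep, hcd]
      rw [hstep]
      rcases eq_or_ne c c0 with he | hne
      · subst he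
        simp [hcd]
      · simp [List.mem_cons, hne]
    · simp only [Bool.not_eq_true] at hcd
      have hstep : memoStep full d c0
          = d.insert c0 ((full.countP (fun x => decide (x < c0)) : Nat) : Int) := by
        simp [memoStep, hcd]
      rw [hstep]
      rcases eq_or_ne c c0 with he | hne
      · subst he
        simp [PySem.Dict.contains_insert_self, PySem.Dict.get?_insert_self, hcd]
      · rw [PySem.Dict.get?_insert, if_neg hne]
        have hcont : (d.insert c0 ((full.countP (fun x => decide (x < c0)) : Nat) : Int)).contains c
            = d.contains c := by
          rw [PySem.Dict.contains_insert]
          simp [hne]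
        rw [hcont]
        simp [List.mem_cons, hne]

lemma drain (l : List Char) (lessD : PySem.Dict Char Int)
    (hless : ∀ c ∈ l, lessD.get? c = some ((l.countP (fun x => decide (x < c)) : Nat) : Int)) :
    ∀ (r p : List Char) (d : PySem.Dict Char (List Int)) (seen : PySem.Dict Char Int)
      (acc : List Int),
    l = p ++ r →
    (∀ c ∈ r, d.get? c = some (PySem.List.pyRange
        ((l.countP (fun x => decide (x < c)) : Int) + (p.count c : Int))
        ((l.countP (fun x => decide (x < c)) : Int) + (l.count c : Int)))) →
    (∀ c, seen.getD c 0 = (p.count c : Int)) →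
    (r.foldl drainStep (d, acc)).2 = (r.foldl (altStep lessD) (seen, acc)).2 := by
  intro r
  induction r with
  | nil => intro p d seen acc _ _ _; rfl
  | cons c r ih =>
    intro p d seen acc hl hd hseen
    have hcount : p.count c < l.count c := by
      rw [hl, List.count_append, List.count_cons_self]
      omega
    have hlt : (l.countP (fun x => decide (x < c)) : Int) + (p.count c : Int)
        < (l.countP (fun x => decide (x < c)) : Int) + (l.count c : Int) := by
      have : (p.count c : Int) < (l.count c : Int) := by exact_mod_cast hcount
      omega
    have hget := hd c (List.mem_cons_self ..)
    rw [PySem.List.pyRange_one_cons hlt] at hget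
    have hstep : drainStep (d, acc) c =
        (d.insert c (PySem.List.pyRange
            ((l.countP (fun x => decide (x < c)) : Int) + (p.count c : Int) + 1)
            ((l.countP (fun x => decide (x < c)) : Int) + (l.count c : Int))),
         acc ++ [(l.countP (fun x => decide (x < c)) : Int) + (p.count c : Int)]) := by
      simp only [drainStep, hget]
    have hcl : c ∈ l := by rw [hl]; exact List.mem_append_right p (List.mem_cons_self ..)
    have hstep' : altStep lessD (seen, acc) c =
        (seen.insert c ((p.count c : Int) + 1),
         acc ++ [(l.countP (fun x => decide (x < c)) : Int) + (p.count c : Int)]) := by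
      simp only [altStep, hless c hcl, hseen c]
    rw [List.foldl_cons, List.foldl_cons, hstep, hstep']
    have hl' : l = (p ++ [c]) ++ r := by rw [hl]; simp
    have hd' : ∀ c' ∈ r,
        (d.insert c (PySem.List.pyRange
            ((l.countP (fun x => decide (x < c)) : Int) + (p.count c : Int) + 1)
            ((l.countP (fun x => decide (x < c)) : Int) + (l.count c : Int)))).get? c'
          = some (PySem.List.pyRange
            ((l.countP (fun x => decide (x < c')) : Int) + ((p ++ [c]).count c' : Int))
            ((l.countP (fun x => decide (x < c')) : Int) + (l.count c' : Int))) := by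
      intro c' hc'
      rcases eq_or_ne c' c with he | hne
      · subst he
        rw [PySem.Dict.get?_insert, if_pos rfl]
        have harg : ((l.countP (fun x => decide (x < c')) : Int) + ((p ++ [c']).count c' : Int))
            = (l.countP (fun x => decide (x < c')) : Int) + (p.count c' : Int) + 1 := by
          rw [List.count_append, List.count_cons_self, List.count_nil]
          push_cast
          ring
        rw [harg]
      · rw [PySem.Dict.get?_insert, if_neg hne]
        have harg : ((p ++ [c]).count c' : Int) = (p.count c' : Int) := by
          rw [List.count_append, List.count_cons, List.count_nil]
          simp [Ne.symm hne]
        rw [harg]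
        exact hd c' (List.mem_cons_of_mem _ hc')
    have hseen' : ∀ c', (seen.insert c ((p.count c : Int) + 1)).getD c' 0
        = ((p ++ [c]).count c' : Int) := by
      intro c'
      rw [PySem.Dict.getD_insert]
      rcases eq_or_ne c' c with he | hne
      · subst he
        rw [if_pos rfl, List.count_append, List.count_cons_self, List.count_nil]
        push_cast
        ring
      · rw [if_neg hne, List.count_append, List.count_cons, List.count_nil, hseen c']
        simp [Ne.symm hne]
    exact ih (p ++ [c]) _ _ _ hl' hd' hseen'

-- ===== VERDICT (by name: the statement is the Claim_ definition above) =====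
theorem index_key_spec : Claim_equal_index_key := by
  unfold Claim_equal_index_key Spec_index_key
  intro clef _
  have hperm : (PySem.List.sorted clef.toList (fun x => x)).Perm clef.toList :=
    PySem.List.sorted_perm clef.toList (fun x => x) false
  have hpair : (PySem.List.sorted clef.toList (fun x => x)).Pairwise (· ≤ ·) :=
    PySem.List.sorted_pairwise clef.toList (fun x => x)
  have hinit : ∀ c ∈ clef.toList,
      ((PySem.List.enumerate (PySem.List.sorted clef.toList (fun x => x)) 0).foldl
          buildStep PySem.Dict.empty).get? c
        = some (PySem.List.pyRange
            ((clef.toList.countP (fun x => decide (x < c)) : Int)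
              + ((List.count c ([] : List Char) : Nat) : Int))
            ((clef.toList.countP (fun x => decide (x < c)) : Int)
              + (clef.toList.count c : Int))) := by
    intro c hc
    have hmem : c ∈ (PySem.List.enumerate (PySem.List.sorted clef.toList (fun x => x)) 0).map (·.2) := by
      rw [PySem.List.map_snd_enumerate]
      exact (hperm.mem_iff).2 hc
    rw [build_get? _ _ c, if_pos hmem, PySem.Dict.getD_empty, List.nil_append,
        selIdx_enum_sorted _ hpair c 0,
        hperm.countP_eq, hperm.count_eq]
    norm_num
  have hless : ∀ c ∈ clef.toList,
      (clef.toList.foldl (memoStep clef.toList) PySem.Dict.empty).get? c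
        = some ((clef.toList.countP (fun x => decide (x < c)) : Nat) : Int) := by
    intro c hc
    rw [memo_get? clef.toList clef.toList PySem.Dict.empty c,
        if_pos ⟨PySem.Dict.contains_empty c, hc⟩]
  have hseen0 : ∀ c : Char, (PySem.Dict.empty : PySem.Dict Char Int).getD c 0
      = ((List.count c ([] : List Char) : Nat) : Int) := by
    intro c
    rw [PySem.Dict.getD_empty, List.count_nil]
    rfl
  exact drain clef.toList _ hless clef.toList [] _ PySem.Dict.empty [] rfl hinit hseen0
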